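-- pv_equiv track=rewrite | github.com/Ein-00/personalcode | PYTHON/max.py | move_max_to_upper_left
-- ===== SOURCE A (Python) =====
-- def move_max_to_upper_left(matrix):
--     if not matrix or not matrix[0]:
--         return matrix  # Return if the matrix is empty
--
--     max_value = float('-inf')
--     max_position = (0, 0)
--
--     # Find the maximum value and its position
--     for i in range(len(matrix)):
--         for j in range(len(matrix[0])):
--             if matrix[i][j] > max_value:
--                 max_value = matrix[i][j]
--                 max_position = (i, j)
--
--     # Swap the maximum value with the upper left corner
--     matrix[max_position[0]][max_position[1]], matrix[0][0] = matrix[0][0], matrix[max_position[0]][max_position[1]]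
--
--     return matrix
-- ===== SOURCE B (Python) =====
-- def move_max_to_upper_left(matrix):
--     if not matrix or not matrix[0]:
--         return matrix  # nothing to do on an empty matrix
--
--     ncols = len(matrix[0])
--     # pass 1: the maximum value over the cells A inspects
--     mx = max(matrix[i][j] for i in range(len(matrix)) for j in range(ncols))
--     # pass 2: first row-major position holding that maximum
--     i, j = next((i, j) for i in range(len(matrix)) for j in range(ncols)
--                 if matrix[i][j] == mx)
--     matrix[i][j], matrix[0][0] = matrix[0][0], matrix[i][j]
--     return matrix
-- ===== Notes on version B (the rewrite author's own statement) =====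
-- stated objective: alternative
-- what changed: A's single nested loop threading a running (max, position) state is replaced by two independent passes: one computing only the maximum value, then a short-circuiting search for its first row-major occurrence.
import Mathlib
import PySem

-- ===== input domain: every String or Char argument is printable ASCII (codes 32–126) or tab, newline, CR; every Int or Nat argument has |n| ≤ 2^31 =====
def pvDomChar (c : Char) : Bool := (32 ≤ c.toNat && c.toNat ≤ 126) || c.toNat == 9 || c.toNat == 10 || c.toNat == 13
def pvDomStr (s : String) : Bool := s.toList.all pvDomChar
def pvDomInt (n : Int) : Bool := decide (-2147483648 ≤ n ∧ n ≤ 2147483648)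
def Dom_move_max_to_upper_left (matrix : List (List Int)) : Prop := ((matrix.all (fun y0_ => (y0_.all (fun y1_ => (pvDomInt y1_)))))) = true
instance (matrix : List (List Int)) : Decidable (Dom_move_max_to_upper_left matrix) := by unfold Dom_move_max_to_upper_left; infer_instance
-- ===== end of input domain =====

-- B replaces A's single scan threading a running (max, position) state by two independent
-- passes: a max-only pass, then a search for the first row-major occurrence of that maximum
-- (objective: alternative decomposition, same cost). Both Pythons also swap the two cells of
-- the argument IN PLACE (identical mutation); the theorems are about the returned value.

-- ===== PORT A =====
-- A-side helper: body of A's scan; `none` models A's initial float('-inf') max_value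
def pvStepA (f : Nat × Nat → Int) (s : Option Int × (Nat × Nat)) (q : Nat × Nat) :
    Option Int × (Nat × Nat) :=
  match s.1 with
  | none => (some (f q), q)
  | some m => if f q > m then (some (f q), q) else s

-- shared helper: the tuple-swap line both Pythons end with
-- 'matrix[p], matrix[0][0] = matrix[0][0], matrix[p]' (RHS read first, targets left to right)
def pvSwap (matrix : List (List Int)) (p : Nat × Nat) : List (List Int) :=
  let a := (matrix.getD p.1 []).getD p.2 0
  let b := (matrix.getD 0 []).getD 0 0
  let m1 := matrix.set p.1 ((matrix.getD p.1 []).set p.2 b)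
  m1.set 0 ((m1.getD 0 []).set 0 a)

def move_max_to_upper_left (matrix : List (List Int)) : List (List Int) :=
  if matrix = [] ∨ matrix.headD [] = [] then matrix
  else
    -- for i in range(len(matrix)): for j in range(len(matrix[0])): track (max_value, max_position)
    pvSwap matrix
      (((List.range matrix.length).foldl (fun s i =>
          (List.range (matrix.headD []).length).foldl (fun s j =>
            pvStepA (fun q => (matrix.getD q.1 []).getD q.2 0) s (i, j)) s)
        ((none : Option Int), ((0 : Nat), (0 : Nat)))).2)

-- ===== PORT B =====
-- B-side helpers: the row-major index pairs and pass 1 (mx = max of the inspected cells)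
def pvPairsB (nrows ncols : Nat) : List (Nat × Nat) :=
  (List.range nrows).flatMap (fun i => (List.range ncols).map (fun j => (i, j)))

def pvMaxB (matrix : List (List Int)) : Int :=
  (PySem.List.max? ((pvPairsB matrix.length (matrix.headD []).length).map
    (fun q => (matrix.getD q.1 []).getD q.2 0)) (fun x => x)).getD 0

def move_max_to_upper_left_alt (matrix : List (List Int)) : List (List Int) :=
  if matrix = [] ∨ matrix.headD [] = [] then matrix
  else
    -- pass 2: first (i, j) with matrix[i][j] == mx, then the swap
    pvSwap matrix
      (((pvPairsB matrix.length (matrix.headD []).length).find?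
        (fun q => (matrix.getD q.1 []).getD q.2 0 == pvMaxB matrix)).getD (0, 0))

-- ===== PRECONDITION & SPEC =====
-- Pre_ excludes exactly the ragged matrices on which Python A raises IndexError:
-- a row shorter than row 0 is indexed at j < len(matrix[0]).
def Pre_move_max_to_upper_left (matrix : List (List Int)) : Prop :=
  ∀ row ∈ matrix, (matrix.headD []).length ≤ row.length
instance (matrix : List (List Int)) : Decidable (Pre_move_max_to_upper_left matrix) := by
  unfold Pre_move_max_to_upper_left; infer_instance
def pvWitness_move_max_to_upper_left : List (List Int) := [[1, 2], [4, 3]]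

def Spec_move_max_to_upper_left (matrix : List (List Int)) (out : List (List Int)) : Prop := out = move_max_to_upper_left_alt matrix
instance (matrix : List (List Int)) (out : List (List Int)) : Decidable (Spec_move_max_to_upper_left matrix out) := by unfold Spec_move_max_to_upper_left; infer_instance

-- ===== CLAIM (what is proved, stated in full; the proofs are below) =====
def Claim_equal_move_max_to_upper_left : Prop := ∀ (matrix : List (List Int)), Dom_move_max_to_upper_left matrix → Pre_move_max_to_upper_left matrix → Spec_move_max_to_upper_left matrix (move_max_to_upper_left matrix)

-- ===== LEMMAS AND PROOFS =====

def pvMaxF (f : Nat × Nat → Int) (m : Int) (L : List (Nat × Nat)) : Int :=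
  L.foldl (fun a q => max a (f q)) m

lemma pvMaxF_cons (f : Nat × Nat → Int) (m : Int) (q : Nat × Nat) (t : List (Nat × Nat)) :
    pvMaxF f m (q :: t) = pvMaxF f (max m (f q)) t := rfl

lemma pvMaxF_le (f : Nat × Nat → Int) (L : List (Nat × Nat)) :
    ∀ m : Int, m ≤ pvMaxF f m L := by
  induction L with
  | nil => intro m; simp [pvMaxF]
  | cons q t ih =>
    intro m
    calc m ≤ max m (f q) := le_max_left _ _
      _ ≤ pvMaxF f (max m (f q)) t := ih _
      _ = pvMaxF f m (q :: t) := (pvMaxF_cons ..).symm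

lemma pvMaxF_mem (f : Nat × Nat → Int) (L : List (Nat × Nat)) :
    ∀ m : Int, pvMaxF f m L > m → ∃ q ∈ L, f q = pvMaxF f m L := by
  induction L with
  | nil => intro m h; simp [pvMaxF] at h
  | cons q t ih =>
    intro m h
    rw [pvMaxF_cons] at h ⊢
    by_cases h2 : pvMaxF f (max m (f q)) t > max m (f q)
    · obtain ⟨r, hr, he⟩ := ih _ h2
      exact ⟨r, List.mem_cons_of_mem _ hr, he⟩
    · have hle := pvMaxF_le f t (max m (f q))
      have heq : pvMaxF f (max m (f q)) t = max m (f q) := le_antisymm (not_lt.mp h2) hle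
      refine ⟨q, List.mem_cons_self, ?_⟩
      rw [heq] at h ⊢
      rcases max_cases m (f q) with ⟨h1, _⟩ | ⟨h1, _⟩
      · omega
      · omega

lemma pvFind_getD_eq (p : Nat × Nat → Bool) (L : List (Nat × Nat)) (d d' : Nat × Nat)
    (h : ∃ q ∈ L, p q = true) : (L.find? p).getD d = (L.find? p).getD d' := by
  have : (L.find? p).isSome := List.find?_isSome.mpr h
  cases hf : L.find? p with
  | none => rw [hf] at this; simp at this
  | some r => simp

lemma pvRunA (f : Nat × Nat → Int) (L : List (Nat × Nat)) :
    ∀ (m : Int) (p : Nat × Nat),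
    L.foldl (pvStepA f) (some m, p) =
      (some (pvMaxF f m L),
        if pvMaxF f m L > m then (L.find? (fun q => f q == pvMaxF f m L)).getD p else p) := by
  induction L with
  | nil => intro m p; simp [pvMaxF]
  | cons q t ih =>
    intro m p
    rw [List.foldl_cons, pvMaxF_cons]
    by_cases hq : f q > m
    · have hstep : pvStepA f (some m, p) q = (some (f q), q) := by
        simp [pvStepA, hq]
      rw [hstep, ih]
      have hmax : max m (f q) = f q := max_eq_right hq.le
      rw [hmax]
      have hge : f q ≤ pvMaxF f (f q) t := pvMaxF_le f t (f q)
      by_cases hM : pvMaxF f (f q) t > f q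
      · have hcond : pvMaxF f (f q) t > m := lt_trans hq hM
        have hne : ¬ (f q == pvMaxF f (f q) t) = true := by
          simp; omega
        rw [if_pos hM, if_pos hcond,
          show List.find? (fun q' => f q' == pvMaxF f (f q) t) (q :: t)
              = List.find? (fun q' => f q' == pvMaxF f (f q) t) t from
            List.find?_cons_of_neg hne]
        obtain ⟨r, hr, he⟩ := pvMaxF_mem f t (f q) hM
        exact congrArg _ (pvFind_getD_eq _ t q p ⟨r, hr, by simp [he]⟩)
      · have heq : pvMaxF f (f q) t = f q := le_antisymm (not_lt.mp hM) hge
        have hcond : pvMaxF f (f q) t > m := by omega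
        rw [if_neg hM, if_pos hcond,
          show List.find? (fun q' => f q' == pvMaxF f (f q) t) (q :: t) = some q from
            List.find?_cons_of_pos (by simp [heq]), Option.getD_some]
    · have hstep : pvStepA f (some m, p) q = (some m, p) := by
        simp [pvStepA, hq]
      rw [hstep, ih]
      have hmax : max m (f q) = m := max_eq_left (not_lt.mp hq)
      rw [hmax]
      by_cases hM : pvMaxF f m t > m
      · have hne : ¬ (f q == pvMaxF f m t) = true := by
          simp; omega
        rw [if_pos hM, if_pos hM,
          show List.find? (fun q' => f q' == pvMaxF f m t) (q :: t)
              = List.find? (fun q' => f q' == pvMaxF f m t) t from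
            List.find?_cons_of_neg hne]
      · rw [if_neg hM, if_neg hM]

lemma pvNestedFlat (step : Option Int × (Nat × Nat) → Nat × Nat → Option Int × (Nat × Nat))
    (mrows ncols : Nat) (init : Option Int × (Nat × Nat)) :
    (List.range mrows).foldl (fun s i =>
        (List.range ncols).foldl (fun s j => step s (i, j)) s) init =
      ((List.range mrows).flatMap (fun i =>
        (List.range ncols).map (fun j => (i, j)))).foldl step init := by
  rw [List.flatMap, List.foldl_flatten, List.foldl_map]
  simp [List.foldl_map]

lemma pvPairsCons (mr nc : Nat) :
    ∃ t, (List.range (mr + 1)).flatMap (fun i =>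
        (List.range (nc + 1)).map (fun j => (i, j))) = ((0, 0) : Nat × Nat) :: t := by
  simp only [List.range_succ_eq_map, List.flatMap_cons, List.map_cons]
  exact ⟨_, rfl⟩

-- ===== VERDICT (by name: the statement is the Claim_ definition above) =====
theorem move_max_to_upper_left_spec : Claim_equal_move_max_to_upper_left := by
  intro matrix _hdom _hpre
  unfold Spec_move_max_to_upper_left move_max_to_upper_left move_max_to_upper_left_alt
  by_cases hguard : matrix = [] ∨ matrix.headD [] = []
  · rw [if_pos hguard, if_pos hguard]
  · rw [if_neg hguard, if_neg hguard]
    push Not at hguard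
    obtain ⟨hm, hr⟩ := hguard
    obtain ⟨mr, hmr⟩ : ∃ k, matrix.length = k + 1 := by
      cases matrix with
      | nil => exact absurd rfl hm
      | cons a l => exact ⟨l.length, rfl⟩
    obtain ⟨nc, hnc⟩ : ∃ k, (matrix.headD []).length = k + 1 := by
      cases h : matrix.headD [] with
      | nil => exact absurd h hr
      | cons a l => exact ⟨l.length, rfl⟩
    set f : Nat × Nat → Int := fun q => (matrix.getD q.1 []).getD q.2 0 with hf
    congr 1
    rw [pvNestedFlat (pvStepA f), pvMaxB, pvPairsB, hmr, hnc]
    obtain ⟨T, hT⟩ := pvPairsCons mr nc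
    rw [hT]
    -- peel the first pair: A's first iteration always updates (max_value = -inf)
    rw [List.foldl_cons]
    have h0 : pvStepA f ((none : Option Int), ((0 : Nat), (0 : Nat))) (0, 0) =
        (some (f (0, 0)), (0, 0)) := rfl
    rw [h0, pvRunA]
    -- B side: the max over the cells and the first position reaching it
    rw [List.map_cons, PySem.List.max?_id_cons, List.foldl_map, Option.getD_some]
    have hMfold : (T.foldl (fun a q => max a (f q)) (f (0, 0))) = pvMaxF f (f (0, 0)) T := rfl
    rw [hMfold]
    set M := pvMaxF f (f (0, 0)) T with hM
    have hge : f (0, 0) ≤ M := pvMaxF_le f T (f (0, 0))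
    by_cases hlt : M > f (0, 0)
    · rw [if_pos hlt]
      have hne : ¬ (f (0, 0) == M) = true := by simp; omega
      show (List.find? (fun q => f q == M) T).getD (0, 0)
          = (List.find? (fun q => f q == M) (((0, 0) : Nat × Nat) :: T)).getD (0, 0)
      rw [show List.find? (fun q => f q == M) (((0, 0) : Nat × Nat) :: T)
          = List.find? (fun q => f q == M) T from List.find?_cons_of_neg hne]
    · rw [if_neg hlt]
      have heq : f (0, 0) = M := le_antisymm hge (not_lt.mp hlt)
      show ((0 : Nat), (0 : Nat))
          = (List.find? (fun q => f q == M) (((0, 0) : Nat × Nat) :: T)).getD (0, 0)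
      rw [show List.find? (fun q => f q == M) (((0, 0) : Nat × Nat) :: T)
          = some ((0, 0) : Nat × Nat) from
        List.find?_cons_of_pos (by simp only [beq_iff_eq]; exact heq), Option.getD_some]
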